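-- pv_equiv track=rewrite | github.com/diegorodriguezv/pythonchallenge | level_32/csp_number.py | is_consistent
-- ===== SOURCE A (Python) =====
-- def col_is_consistent(csp, assignment, constr, col):
--     w, h, horiz_constr, vert_constr = csp
--     row = ''.join([('{:0' + str(w) + 'b}').format(bits)[col] for bits in assignment])
--     return bit_str_is_consistent(csp, row, constr)
--
-- def is_consistent(csp, assignment, value):
--     w, h, horiz_constr, vert_constr = csp
--     new_ass = assignment + [value]
--     if len(new_ass) == h:
--         for col in range(len(vert_constr)):
--             if not col_is_consistent(csp, new_ass, vert_constr[col], col):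
--                 return False
--     return True
--
-- def bit_str_is_consistent(csp, bin_bits_str, constraint):
--     lengths_of_1 = []
--     prev = False
--     current_length = 0
--     for bit in bin_bits_str:
--         if bit == '1':
--             current_length += 1
--         else:
--             if prev:
--                 if len(lengths_of_1) < len(constraint) and current_length != constraint[len(lengths_of_1)]:
--                     return False
--                 lengths_of_1.append(current_length)
--                 current_length = 0
--         prev = bit == '1'
--     if current_length > 0:
--         lengths_of_1.append(current_length)
--     return lengths_of_1 == constraint
-- ===== SOURCE B (Python) =====
-- def is_consistent(csp, assignment, value):
--     w, h, horiz_constr, vert_constr = csp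
--     new_ass = assignment + [value]
--     if len(new_ass) != h:
--         return True
--     n = len(vert_constr)
--     runs = [[] for _ in range(n)]
--     cur = [0] * n
--     for bits in new_ass:
--         for col in range(n):
--             if (bits >> (w - 1 - col)) & 1:
--                 cur[col] += 1
--             else:
--                 if cur[col]:
--                     runs[col].append(cur[col])
--                     cur[col] = 0
--     for col in range(n):
--         if cur[col]:
--             runs[col].append(cur[col])
--         if runs[col] != vert_constr[col]:
--             return False
--     return True
-- ===== Notes on version B (the rewrite author's own statement) =====
-- stated objective: alternative
-- what changed: B replaces A's per-column string extraction (format every row to a w-bit string, pick out column col, scan it for runs, once per column) by a single row-major pass that maintains a current-run counter and a completed-run list for every column at once, extracting bits arithmetically with shifts instead of via formatted strings.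
-- outside the precondition, e.g. on is_consistent((1, 1, [], [[1]]), [], -1): A returns False, B returns True
import Mathlib
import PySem

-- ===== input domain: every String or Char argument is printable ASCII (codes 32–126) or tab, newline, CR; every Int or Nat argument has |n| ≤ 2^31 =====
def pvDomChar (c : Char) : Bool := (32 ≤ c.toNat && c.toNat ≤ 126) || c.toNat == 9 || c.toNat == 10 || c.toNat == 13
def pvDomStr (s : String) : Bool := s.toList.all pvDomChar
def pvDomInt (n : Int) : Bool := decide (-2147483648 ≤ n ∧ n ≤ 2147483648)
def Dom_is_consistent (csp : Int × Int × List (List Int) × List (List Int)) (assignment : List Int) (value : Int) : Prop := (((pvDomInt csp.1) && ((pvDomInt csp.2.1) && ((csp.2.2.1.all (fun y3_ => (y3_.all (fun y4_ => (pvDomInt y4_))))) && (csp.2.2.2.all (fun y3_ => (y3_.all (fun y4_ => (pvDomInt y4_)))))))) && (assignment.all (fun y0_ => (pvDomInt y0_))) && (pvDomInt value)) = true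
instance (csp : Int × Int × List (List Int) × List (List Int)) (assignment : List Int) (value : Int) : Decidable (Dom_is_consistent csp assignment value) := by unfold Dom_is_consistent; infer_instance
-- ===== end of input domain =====

-- B replaces A's per-column string extraction + run scan by a single row-major pass that
-- maintains every column's run-length list at once (objective: alternative decomposition, same cost class).

-- ===== PORT A =====
-- hand port of ('{:0'+str(w)+'b}').format(bits): exact for 1 ≤ w and 0 ≤ bits < 2^w
-- (the Pre_ domain), where Python's result is exactly the w zero-padded binary digits, MSB first.
def pyFormatBin (w : Int) (bits : Int) : List Char :=
  (List.range w.toNat).map (fun i => if bits.toNat.testBit (w.toNat - 1 - i) then '1' else '0')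

-- bit_str_is_consistent's loop: state (lengths_of_1, prev, current_length), early return on mid-run mismatch
def bitStrCons (constraint : List Int) : List Char → List Int → Bool → Int → Bool
  | [], lengths, _, cur => (if cur > 0 then lengths ++ [cur] else lengths) == constraint
  | ch :: rest, lengths, prev, cur =>
    if ch == '1' then bitStrCons constraint rest lengths true (cur + 1)
    else
      if prev then
        if lengths.length < constraint.length ∧ cur ≠ constraint.getD lengths.length 0 then false
        else bitStrCons constraint rest (lengths ++ [cur]) false 0
      else bitStrCons constraint rest lengths false cur

-- col_is_consistent; the [col] indexing uses pyGet? (in range on every Pre_ input; getD default never read there)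
def colIsConsistentA (csp : Int × Int × List (List Int) × List (List Int)) (newAss : List Int) (constr : List Int) (col : Int) : Bool :=
  let row := newAss.map (fun bits => (PySem.List.pyGet? (pyFormatBin csp.1 bits) col).getD ' ')
  bitStrCons constr row [] false 0

def is_consistent (csp : Int × Int × List (List Int) × List (List Int)) (assignment : List Int) (value : Int) : Bool :=
  let newAss := assignment ++ [value]
  if (newAss.length : Int) = csp.2.1 then
    (List.range csp.2.2.2.length).all (fun col =>
      colIsConsistentA csp newAss (csp.2.2.2.getD col []) (col : Int))
  else true

-- ===== PORT B =====
-- single row-major pass; Python's '(bits >> (w-1-col)) & 1': .toNat is exact since w-1-col ≥ 0 on every Pre_ input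
def is_consistent_alt (csp : Int × Int × List (List Int) × List (List Int)) (assignment : List Int) (value : Int) : Bool :=
  let w := csp.1
  let newAss := assignment ++ [value]
  if (newAss.length : Int) = csp.2.1 then
    let n := csp.2.2.2.length
    let init : List (List Int × Int) := (List.range n).map (fun _ => (([] : List Int), (0 : Int)))
    let final := newAss.foldl (fun st bits =>
      st.mapIdx (fun col rc =>
        if Int.land (Int.shiftRight bits (w - 1 - (col : Int)).toNat) 1 == 1 then (rc.1, rc.2 + 1)
        else if rc.2 != 0 then (rc.1 ++ [rc.2], 0) else rc)) init
    (List.range n).all (fun col =>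
      let rc := final.getD col ([], 0)
      (if rc.2 != 0 then rc.1 ++ [rc.2] else rc.1) == csp.2.2.2.getD col [])
  else true

-- ===== PRECONDITION & SPEC =====
-- Pre_ restricts, ONLY when the column check actually fires (complete assignment, nonempty vertical
-- constraints), to the puzzle's natural domain: width ≥ #columns and every row value a w-bit number.
-- Outside it A still returns: Python's format emits sign/overflow characters that A scans as bits —
-- an artefact of the string encoding, which B's arithmetic bit extraction does not reproduce.
def Pre_is_consistent (csp : Int × Int × List (List Int) × List (List Int)) (assignment : List Int) (value : Int) : Prop :=
  ((assignment.length : Int) + 1 = csp.2.1 ∧ csp.2.2.2 ≠ []) →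
    (1 ≤ csp.1 ∧ (csp.2.2.2.length : Int) ≤ csp.1 ∧
      ∀ b ∈ assignment ++ [value], 0 ≤ b ∧ b < 2 ^ csp.1.toNat)
instance (csp : Int × Int × List (List Int) × List (List Int)) (assignment : List Int) (value : Int) : Decidable (Pre_is_consistent csp assignment value) := by unfold Pre_is_consistent; infer_instance

def pvWitness_is_consistent : (Int × Int × List (List Int) × List (List Int)) × List Int × Int :=
  ((2, 2, [], [[2], [1]]), [3], 2)

def Spec_is_consistent (csp : Int × Int × List (List Int) × List (List Int)) (assignment : List Int) (value : Int) (out : Bool) : Prop := out = is_consistent_alt csp assignment value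
instance (csp : Int × Int × List (List Int) × List (List Int)) (assignment : List Int) (value : Int) (out : Bool) : Decidable (Spec_is_consistent csp assignment value out) := by unfold Spec_is_consistent; infer_instance

-- ===== CLAIM (what is proved, stated in full; the proofs are below) =====
def Claim_equal_is_consistent : Prop := ∀ (csp : Int × Int × List (List Int) × List (List Int)) (assignment : List Int) (value : Int), Dom_is_consistent csp assignment value → Pre_is_consistent csp assignment value → Spec_is_consistent csp assignment value (is_consistent csp assignment value)

-- ===== LEMMAS AND PROOFS =====

-- the shared run-building step and final flush, as proof vocabulary
def pvStep (p : List Int × Int) (b : Bool) : List Int × Int :=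
  if b then (p.1, p.2 + 1) else if p.2 != 0 then (p.1 ++ [p.2], 0) else p

def pvFlush (p : List Int × Int) : List Int :=
  if p.2 != 0 then p.1 ++ [p.2] else p.1

theorem pvFlush_foldl_prefix (s : List Bool) : ∀ (l : List Int) (cur : Int),
    ∃ t, pvFlush (s.foldl pvStep (l, cur)) = l ++ t := by
  induction s with
  | nil =>
    intro l cur
    by_cases hc : cur = 0 <;> simp [pvFlush, hc]
  | cons b rest ih =>
    intro l cur
    by_cases hb : b
    · simpa [pvStep, hb] using ih l (cur + 1)
    · by_cases hc : cur = 0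
      · simpa [pvStep, hb, hc] using ih l 0
      · obtain ⟨t, ht⟩ := ih (l ++ [cur]) 0
        exact ⟨[cur] ++ t, by simpa [pvStep, hb, hc] using ht⟩

theorem bitStrCons_eq (cs : List Int) : ∀ (s : List Char) (l : List Int) (cur : Int), 0 ≤ cur →
    bitStrCons cs s l (cur != 0) cur
      = (pvFlush (s.foldl (fun p ch => pvStep p (ch == '1')) (l, cur)) == cs) := by
  intro s
  induction s with
  | nil =>
    intro l cur hcur
    by_cases hc : cur = 0
    · simp [bitStrCons, pvFlush, hc]
    · simp [bitStrCons, pvFlush, hc, show cur > 0 by omega]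
  | cons ch rest ih =>
    intro l cur hcur
    rw [List.foldl_cons]
    by_cases hch : ch = '1'
    · have hstep : pvStep (l, cur) (ch == '1') = (l, cur + 1) := by simp [pvStep, hch]
      have h1 : ((cur + 1) != 0) = true := by simp; omega
      have hih := ih l (cur + 1) (by omega)
      rw [h1] at hih
      rw [hstep, ← hih]
      simp [bitStrCons, hch]
    · have hch' : (ch == '1') = false := by simp [hch]
      by_cases hc : cur = 0
      · have hstep : pvStep (l, cur) (ch == '1') = (l, cur) := by simp [pvStep, hch', hc]
        have hih := ih l cur hcur
        rw [hstep, ← hih]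
        subst hc
        simp [bitStrCons, hch']
      · have hprev : (cur != 0) = true := by simp [hc]
        have hstep : pvStep (l, cur) (ch == '1') = (l ++ [cur], 0) := by
          simp [pvStep, hch', hc]
        rw [hstep]
        by_cases he : l.length < cs.length ∧ cur ≠ cs.getD l.length 0
        · have hL : bitStrCons cs (ch :: rest) l (cur != 0) cur = false := by
            simp only [bitStrCons, hch', Bool.false_eq_true, if_false, hprev, if_true]
            rw [if_pos he]
          rw [hL]
          obtain ⟨t, ht⟩ := pvFlush_foldl_prefix (rest.map (fun c2 => c2 == '1')) (l ++ [cur]) 0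
          rw [List.foldl_map] at ht
          rw [ht]
          have hne : (l ++ [cur]) ++ t ≠ cs := by
            intro hEq
            have h1 : ((l ++ [cur]) ++ t)[l.length]? = some cur := by
              rw [List.append_assoc, List.getElem?_append_right (le_refl _)]
              simp
            have h2 : cs[l.length]? = some (cs.getD l.length 0) := by
              rw [List.getElem?_eq_getElem he.1]
              simp [List.getD, List.getElem?_eq_getElem he.1]
            rw [hEq, h2] at h1
            exact he.2 (by simpa using h1.symm)
          exact (beq_eq_false_iff_ne.mpr hne).symm
        · have hL : bitStrCons cs (ch :: rest) l (cur != 0) cur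
              = bitStrCons cs rest (l ++ [cur]) false 0 := by
            simp only [bitStrCons, hch', Bool.false_eq_true, if_false, hprev, if_true]
            rw [if_neg he]
          rw [hL]
          have hih := ih (l ++ [cur]) 0 (le_refl 0)
          rw [show ((0 : Int) != 0) = false by decide] at hih
          exact hih

theorem foldl_mapIdx_get {α β : Type} (g : β → Nat → α → α) :
    ∀ (rows : List β) (st : List α) (i : Nat),
      (rows.foldl (fun s b => List.mapIdx (fun j a => g b j a) s) st)[i]?
        = (st[i]?).map (fun a => rows.foldl (fun a b => g b i a) a) := by
  intro rows
  induction rows with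
  | nil => intro st i; simp
  | cons b rest ih =>
    intro st i
    simp only [List.foldl_cons]
    rw [ih]
    simp [List.getElem?_mapIdx, Option.map_map, Function.comp_def]

theorem all_congr_mem {α : Type} (l : List α) (p q : α → Bool)
    (h : ∀ x ∈ l, p x = q x) : l.all p = l.all q := by
  induction l with
  | nil => rfl
  | cons x xs ih =>
    simp only [List.all_cons]
    rw [h x (by simp), ih (fun y hy => h y (by simp [hy]))]

theorem natCast_beq_one (m : Nat) : (((m : Nat) : Int) == 1) = (m == 1) := by
  rcases eq_or_ne m 1 with rfl | hm
  · rfl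
  · have h1 : (m == 1) = false := by simp [hm]
    have h2 : (((m : Nat) : Int) == 1) = false := by simp [hm]
    rw [h1, h2]

theorem charAt_eq_bit (w bits : Int) (col : Nat) (hw : 1 ≤ w) (hcol : (col : Int) < w)
    (hb : 0 ≤ bits) :
    ((PySem.List.pyGet? (pyFormatBin w bits) (col : Int)).getD ' ' == '1')
      = (Int.land (Int.shiftRight bits (w - 1 - (col : Int)).toNat) 1 == 1) := by
  lift bits to ℕ using hb with n
  have hlt : col < w.toNat := by omega
  have hk : (w - 1 - (col : Int)).toNat = w.toNat - 1 - col := by omega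
  have hsr : Int.shiftRight (n : Int) (w.toNat - 1 - col)
      = ((n >>> (w.toNat - 1 - col) : Nat) : Int) := by
    simp [Int.shiftRight]
  have hland : Int.land ((n >>> (w.toNat - 1 - col) : Nat) : Int) 1
      = (((n >>> (w.toNat - 1 - col)) &&& 1 : Nat) : Int) := by
    rw [show (1 : Int) = ((1 : Nat) : Int) from rfl]
    simp [Int.land]
  have htb : n.testBit (w.toNat - 1 - col) = ((n >>> (w.toNat - 1 - col)) &&& 1 == 1) := by
    simp [Nat.testBit]
  rw [hk, hsr, hland, natCast_beq_one, ← htb]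
  simp only [pyFormatBin, PySem.List.pyGet?_natCast, List.getElem?_map,
    List.getElem?_range hlt, Option.map_some, Option.getD_some, Int.toNat_natCast]
  by_cases ht : n.testBit (w.toNat - 1 - col) <;> simp [ht]

theorem is_consistent_spec_aux (csp : Int × Int × List (List Int) × List (List Int))
    (assignment : List Int) (value : Int) (hpre : Pre_is_consistent csp assignment value) :
    is_consistent csp assignment value = is_consistent_alt csp assignment value := by
  obtain ⟨w, h, hc, vc⟩ := csp
  simp only [is_consistent, is_consistent_alt]
  by_cases hlen : (((assignment ++ [value]).length : Int) = h)
  · rw [if_pos hlen, if_pos hlen]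
    rcases List.eq_nil_or_concat vc with hvc0 | hconc
    · subst hvc0; rfl
    · have hvc : vc ≠ [] := by rcases hconc with ⟨l', b, rfl⟩; simp
      have hlen' : (assignment.length : Int) + 1 = h := by
        have h2 := hlen
        rw [List.length_append, List.length_singleton] at h2
        push_cast at h2 ⊢
        omega
      obtain ⟨hw, hn, hbits⟩ := hpre ⟨hlen', hvc⟩
      have hn' : (vc.length : Int) ≤ w := hn
      apply all_congr_mem
      intro col hcolmem
      have hcol : col < vc.length := List.mem_range.mp hcolmem
      have hBcol :
          (((assignment ++ [value]).foldl (fun st bits =>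
              List.mapIdx (fun j rc =>
                if Int.land (Int.shiftRight bits (w - 1 - (j : Int)).toNat) 1 == 1 then
                  (rc.1, rc.2 + 1)
                else if rc.2 != 0 then (rc.1 ++ [rc.2], 0) else rc) st)
              ((List.range vc.length).map (fun _ => (([] : List Int), (0 : Int)))))).getD col ([], 0)
            = (assignment ++ [value]).foldl (fun rc bits =>
                pvStep rc (Int.land (Int.shiftRight bits (w - 1 - (col : Int)).toNat) 1 == 1))
                ([], 0) := by
        rw [List.getD_eq_getElem?_getD,
          foldl_mapIdx_get (fun bits j rc =>
            if Int.land (Int.shiftRight bits (w - 1 - (j : Int)).toNat) 1 == 1 then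
              (rc.1, rc.2 + 1)
            else if rc.2 != 0 then (rc.1 ++ [rc.2], 0) else rc)]
        have hinit :
            ((List.range vc.length).map (fun _ => (([] : List Int), (0 : Int))))[col]?
              = some ([], 0) := by
          simp [hcol]
        rw [hinit]
        simp only [Option.map_some, Option.getD_some, pvStep]
      rw [hBcol]
      simp only [colIsConsistentA]
      have hbs := bitStrCons_eq (vc.getD col [])
        ((assignment ++ [value]).map
          (fun bits => (PySem.List.pyGet? (pyFormatBin w bits) (col : Int)).getD ' '))
        [] 0 (le_refl 0)
      rw [show ((0 : Int) != 0) = false by decide] at hbs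
      rw [hbs, List.foldl_map]
      have hfold :
          (assignment ++ [value]).foldl (fun p bits =>
              pvStep p ((PySem.List.pyGet? (pyFormatBin w bits) (col : Int)).getD ' ' == '1'))
            (([] : List Int), (0 : Int))
          = (assignment ++ [value]).foldl (fun rc bits =>
              pvStep rc (Int.land (Int.shiftRight bits (w - 1 - (col : Int)).toNat) 1 == 1))
            ([], 0) := by
        apply PySem.List.foldl_congr_mem
        intro acc bits hmem
        rw [charAt_eq_bit w bits col hw (by omega) (hbits bits hmem).1]
      rw [hfold]
      simp only [pvFlush]
  · rw [if_neg hlen, if_neg hlen]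

-- ===== VERDICT (by name: the statement is the Claim_ definition above) =====
theorem is_consistent_spec : Claim_equal_is_consistent := by
  intro csp assignment value _hdom hpre
  unfold Spec_is_consistent
  exact is_consistent_spec_aux csp assignment value hpre
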